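-- pv_equiv track=rewrite | github.com/Christian-Nunnally/wings3 | src/pipeline/transformMapsHeaderGenerator.py | flipAndInterleaveAlongYAxis
-- ===== SOURCE A (Python) =====
-- def flipAndInterleaveAlongYAxis(original2dArray):
--     arrayFlippedAlongYAxis = [row[::-1] for row in original2dArray]
--     transposedFlippedArray = [list(row) for row in zip(*arrayFlippedAlongYAxis)]
--     interleaved = []
--     for originalColumn, flippedColumn in zip(zip(*original2dArray), transposedFlippedArray):
--         interleaved.extend([list(originalColumn), flippedColumn])
--     interleavedAlongYAxis = list(map(list, zip(*interleaved)))
--     interleavedAlongYAxisHalf = []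
--     for line in interleavedAlongYAxis:
--         currentLine = []
--         for i in range(len(line) // 2):
--             currentLine.append(line[i])
--         interleavedAlongYAxisHalf.append(currentLine)
--     return interleavedAlongYAxisHalf
-- ===== SOURCE B (Python) =====
-- def flipAndInterleaveAlongYAxis(original2dArray):
--     # B: direct index-permutation, one pass; output[r][i] = row[i//2] if i even
--     # else row[len(row)-1-i//2], for i < C = min row length.
--     c = min((len(row) for row in original2dArray), default=0)
--     if c == 0:
--         return []
--     return [[row[i // 2] if i % 2 == 0 else row[len(row) - 1 - i // 2]
--              for i in range(c)]
--             for row in original2dArray]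
-- ===== Notes on version B (the rewrite author's own statement) =====
-- stated objective: simpler
-- what changed: B replaces A's four transpose/interleave materializations by a single row-wise comprehension computing each output entry directly by an index formula (even i -> row[i//2], odd i -> row[len(row)-1-i//2]) over the minimum column count.
import Mathlib
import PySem

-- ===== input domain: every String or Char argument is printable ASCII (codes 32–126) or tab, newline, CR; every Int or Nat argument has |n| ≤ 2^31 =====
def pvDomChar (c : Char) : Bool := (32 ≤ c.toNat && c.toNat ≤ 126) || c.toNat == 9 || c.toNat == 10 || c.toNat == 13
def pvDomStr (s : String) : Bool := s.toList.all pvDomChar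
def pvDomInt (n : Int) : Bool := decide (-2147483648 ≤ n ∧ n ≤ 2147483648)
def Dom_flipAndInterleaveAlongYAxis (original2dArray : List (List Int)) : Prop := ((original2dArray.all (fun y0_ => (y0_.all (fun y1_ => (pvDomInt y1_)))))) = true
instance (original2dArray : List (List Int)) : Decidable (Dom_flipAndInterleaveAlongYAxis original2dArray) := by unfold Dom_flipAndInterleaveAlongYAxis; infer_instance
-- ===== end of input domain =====

-- B computes each output entry by a direct index permutation in one pass over the rows,
-- instead of A's four zip(*...) transpositions; same asymptotic cost, simpler.

-- ===== PORT A =====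
-- helper: Python `zip(*rows)` — truncating transpose (empty when rows is empty)
def pvMinLen (rows : List (List Int)) : Nat :=
  match rows with
  | [] => 0
  | r :: rs => rs.foldl (fun m x => min m x.length) r.length

def pvZipStar (rows : List (List Int)) : List (List Int) :=
  match rows with
  | [] => []
  | _ :: _ => (List.range (pvMinLen rows)).map (fun j => rows.map (fun row => row.getD j 0))

def flipAndInterleaveAlongYAxis (original2dArray : List (List Int)) : List (List Int) :=
  let arrayFlippedAlongYAxis := original2dArray.map List.reverse          -- row[::-1]
  let transposedFlippedArray := pvZipStar arrayFlippedAlongYAxis          -- zip(*flipped)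
  let interleaved := ((pvZipStar original2dArray).zip transposedFlippedArray).foldl
      (fun acc p => acc ++ [p.1, p.2]) []                                 -- interleaved.extend([...])
  let interleavedAlongYAxis := pvZipStar interleaved                      -- zip(*interleaved)
  interleavedAlongYAxis.map (fun line =>
    (List.range (line.length / 2)).map (fun i => line.getD i 0))          -- first half of each line

-- ===== PORT B =====
def flipAndInterleaveAlongYAxis_alt (original2dArray : List (List Int)) : List (List Int) :=
  let c : Nat := match original2dArray.map List.length with
    | [] => 0
    | x :: xs => xs.foldl min x                                           -- min(lengths, default=0)
  if c = 0 then []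
  else original2dArray.map (fun row =>
    (List.range c).map (fun i =>
      if i % 2 = 0 then row.getD (i / 2) 0 else row.getD (row.length - 1 - i / 2) 0))

-- ===== PRECONDITION & SPEC =====
def Spec_flipAndInterleaveAlongYAxis (original2dArray : List (List Int)) (out : List (List Int)) : Prop := out = flipAndInterleaveAlongYAxis_alt original2dArray
instance (original2dArray : List (List Int)) (out : List (List Int)) : Decidable (Spec_flipAndInterleaveAlongYAxis original2dArray out) := by unfold Spec_flipAndInterleaveAlongYAxis; infer_instance

-- ===== CLAIM (what is proved, stated in full; the proofs are below) =====
def Claim_equal_flipAndInterleaveAlongYAxis : Prop := ∀ (original2dArray : List (List Int)), Dom_flipAndInterleaveAlongYAxis original2dArray → Spec_flipAndInterleaveAlongYAxis original2dArray (flipAndInterleaveAlongYAxis original2dArray)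

-- ===== LEMMAS AND PROOFS =====

-- B's inline minimum equals pvMinLen
lemma altC_eq_pvMinLen (arr : List (List Int)) :
    (match arr.map List.length with
     | [] => 0
     | x :: xs => xs.foldl min x) = pvMinLen arr := by
  cases arr with
  | nil => rfl
  | cons r rs => simp [pvMinLen, List.foldl_map]

lemma pvMinLen_le (arr : List (List Int)) (row : List Int) (h : row ∈ arr) :
    pvMinLen arr ≤ row.length := by
  cases arr with
  | nil => cases h
  | cons r rs =>
    have aux : ∀ (l : List (List Int)) (a : Nat),
        l.foldl (fun m x => min m x.length) a ≤ a ∧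
        ∀ x ∈ l, l.foldl (fun m x => min m x.length) a ≤ x.length := by
      intro l
      induction l with
      | nil => intro a; simp
      | cons y ys ih =>
        intro a
        refine ⟨?_, ?_⟩
        · simpa using le_trans (ih (min a y.length)).1 (by omega)
        · intro x hx
          rcases List.mem_cons.mp hx with hx | hx
          · simpa [hx] using le_trans (ih (min a y.length)).1 (by omega)
          · exact (ih (min a y.length)).2 x hx
    rcases List.mem_cons.mp h with h | h
    · simpa [pvMinLen, h] using (aux rs r.length).1
    · simpa [pvMinLen] using (aux rs r.length).2 row h

lemma pvMinLen_map_reverse (arr : List (List Int)) :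
    pvMinLen (arr.map List.reverse) = pvMinLen arr := by
  cases arr with
  | nil => rfl
  | cons r rs => simp [pvMinLen, List.foldl_map]

lemma pvMinLen_const (rows : List (List Int)) (R : Nat)
    (hne : rows ≠ []) (h : ∀ x ∈ rows, x.length = R) :
    pvMinLen rows = R := by
  cases rows with
  | nil => cases hne rfl
  | cons r rs =>
    have aux : ∀ (l : List (List Int)), (∀ x ∈ l, x.length = R) →
        l.foldl (fun m x => min m x.length) R = R := by
      intro l
      induction l with
      | nil => intro _; rfl
      | cons y ys ih =>
        intro hl
        have hy := hl y (by simp)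
        simp [hy, ih (fun x hx => hl x (by simp [hx]))]
    have hr := h r (by simp)
    simpa [pvMinLen, hr] using aux rs (fun x hx => h x (by simp [hx]))

lemma flat2_length {α β : Type} (l : List β) (u v : β → α) :
    (l.flatMap fun x => [u x, v x]).length = 2 * l.length := by
  induction l with
  | nil => rfl
  | cons y ys ih => simp [ih]; omega

lemma flat2_range_getD {α : Type} (n : Nat) (u v : Nat → α) (d : α) :
    ∀ i, i < 2 * n →
      ((List.range n).flatMap (fun j => [u j, v j])).getD i d =
        if i % 2 = 0 then u (i / 2) else v (i / 2) := by
  induction n with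
  | zero => intro i hi; omega
  | succ n ih =>
    intro i hi
    rw [List.range_succ, List.flatMap_append]
    have hlen : ((List.range n).flatMap (fun j => [u j, v j])).length = 2 * n := by
      simpa using flat2_length (List.range n) u v
    by_cases h : i < 2 * n
    · rw [List.getD_append _ _ _ _ (by omega)]
      exact ih i h
    · have hge : ((List.range n).flatMap (fun j => [u j, v j])).length ≤ i := by omega
      rw [List.getD_append_right _ _ _ _ hge]
      have : i = 2 * n ∨ i = 2 * n + 1 := by omega
      rcases this with h2 | h2
      · have hd : 2 * n / 2 = n := by omega
        simp [h2, hlen, hd]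
      · have hpar : (2 * n + 1) % 2 = 1 := by omega
        have hd : (2 * n + 1) / 2 = n := by omega
        simp [h2, hlen, hpar, hd]

lemma pvZipStar_ne (rows : List (List Int)) (h : rows ≠ []) :
    pvZipStar rows
      = (List.range (pvMinLen rows)).map (fun j => rows.map (fun row => row.getD j 0)) := by
  cases rows with
  | nil => cases h rfl
  | cons r rs => rfl

lemma getD_map_lt (l : List (List Int)) (f : List Int → Int) (r : Nat) (h : r < l.length) :
    (l.map f).getD r 0 = f l[r] := by
  rw [List.getD_eq_getElem _ _ (by simpa using h), List.getElem_map]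

-- main lemma: A equals B
lemma main_eq (arr : List (List Int)) :
    flipAndInterleaveAlongYAxis arr = flipAndInterleaveAlongYAxis_alt arr := by
  by_cases hC : pvMinLen arr = 0
  · have hB : flipAndInterleaveAlongYAxis_alt arr = [] := by
      simp [flipAndInterleaveAlongYAxis_alt, altC_eq_pvMinLen, hC]
    have hA : flipAndInterleaveAlongYAxis arr = [] := by
      cases arr with
      | nil => rfl
      | cons r rs =>
        simp [flipAndInterleaveAlongYAxis, pvZipStar, hC]
    rw [hA, hB]
  · have hne : arr ≠ [] := by
      intro h; subst h; exact hC rfl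
    have hCpos : 0 < pvMinLen arr := Nat.pos_of_ne_zero hC
    have hzA : pvZipStar arr
        = (List.range (pvMinLen arr)).map (fun j => arr.map (fun row => row.getD j 0)) :=
      pvZipStar_ne arr hne
    have hzF : pvZipStar (arr.map List.reverse)
        = (List.range (pvMinLen arr)).map
            (fun j => arr.map (fun row => row.reverse.getD j 0)) := by
      rw [pvZipStar_ne _ (by simpa using hne), pvMinLen_map_reverse]
      simp [List.map_map, Function.comp]
    have hItl : ((pvZipStar arr).zip (pvZipStar (arr.map List.reverse))).foldl
          (fun acc p => acc ++ [p.1, p.2]) []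
        = (List.range (pvMinLen arr)).flatMap
            (fun j => [arr.map (fun row => row.getD j 0),
                       arr.map (fun row => row.reverse.getD j 0)]) := by
      rw [hzA, hzF, List.zip_map', PySem.List.foldl_append_eq_flatMap, List.flatMap_map]
      simp
    set I := (List.range (pvMinLen arr)).flatMap
        (fun j => [arr.map (fun row => row.getD j 0),
                   arr.map (fun row => row.reverse.getD j 0)]) with hI
    have hIlen : I.length = 2 * pvMinLen arr := by
      rw [hI, flat2_length, List.length_range]
    have hIne : I ≠ [] := by
      intro h; rw [h] at hIlen; simp at hIlen; omega
    have hImin : pvMinLen I = arr.length := by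
      apply pvMinLen_const _ _ hIne
      intro x hx
      rw [hI] at hx
      simp only [List.mem_flatMap, List.mem_range, List.mem_cons, List.not_mem_nil,
        or_false] at hx
      rcases hx with ⟨j, _, hx | hx⟩ <;> subst hx <;> simp
    have hAeq : flipAndInterleaveAlongYAxis arr
        = ((List.range arr.length).map (fun r => I.map (fun row => row.getD r 0))).map
            (fun line => (List.range (line.length / 2)).map (fun i => line.getD i 0)) := by
      simp only [flipAndInterleaveAlongYAxis]
      rw [hItl, pvZipStar_ne I hIne, hImin]
    have hBeq : flipAndInterleaveAlongYAxis_alt arr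
        = arr.map (fun row => (List.range (pvMinLen arr)).map (fun i =>
            if i % 2 = 0 then row.getD (i / 2) 0
            else row.getD (row.length - 1 - i / 2) 0)) := by
      simp only [flipAndInterleaveAlongYAxis_alt, altC_eq_pvMinLen]
      rw [if_neg hC]
    rw [hAeq, hBeq, List.map_map]
    apply List.ext_getElem
    · simp
    · intro r h1 h2
      have hr : r < arr.length := by simpa using h2
      simp only [List.getElem_map, List.getElem_range, Function.comp]
      have hline : I.map (fun row => row.getD r 0)
          = (List.range (pvMinLen arr)).flatMap
              (fun j => [(arr.map (fun row => row.getD j 0)).getD r 0,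
                         (arr.map (fun row => row.reverse.getD j 0)).getD r 0]) := by
        rw [hI, List.map_flatMap]
        simp
      rw [hline]
      have hlen2 : ((List.range (pvMinLen arr)).flatMap
            (fun j => [(arr.map (fun row => row.getD j 0)).getD r 0,
                       (arr.map (fun row => row.reverse.getD j 0)).getD r 0])).length
          = 2 * pvMinLen arr := by
        rw [flat2_length, List.length_range]
      rw [hlen2]
      have h2div : 2 * pvMinLen arr / 2 = pvMinLen arr := by omega
      rw [h2div]
      apply List.ext_getElem
      · simp
      · intro i hi1 hi2
        have hiC : i < pvMinLen arr := by simpa using hi1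
        simp only [List.getElem_map, List.getElem_range]
        rw [flat2_range_getD (pvMinLen arr) _ _ 0 i (by omega)]
        have hCle : pvMinLen arr ≤ arr[r].length :=
          pvMinLen_le arr arr[r] (List.getElem_mem hr)
        have hi2' : i / 2 < arr[r].length := by omega
        by_cases hpar : i % 2 = 0
        · rw [if_pos hpar, if_pos hpar, getD_map_lt _ _ _ hr]
        · rw [if_neg hpar, if_neg hpar, getD_map_lt _ _ _ hr]
          rw [List.getD_eq_getElem _ _ (by simpa using hi2'), List.getElem_reverse,
            List.getD_eq_getElem _ _ (by omega)]

-- ===== VERDICT (by name: the statement is the Claim_ definition above) =====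
theorem flipAndInterleaveAlongYAxis_spec : Claim_equal_flipAndInterleaveAlongYAxis := by
  intro arr _
  exact main_eq arr
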